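-- pv_equiv track=rewrite | github.com/xy2333/Leetcode | leetcode/2018拼多多编程题合集.py | isture
-- ===== SOURCE A (Python) =====
-- def isture(d):
-- 	num = 0
-- 	for i in d:
-- 		num += d[i]
-- 	for i in d:
-- 		if d[i] > num//2:
-- 			return i
-- 	return 0
-- ===== SOURCE B (Python) =====
-- def isture(d):
--     # Divide and conquer: total of the values once, then a binary split of the
--     # item list finds the leftmost key whose value exceeds half the total.
--     items = list(d.items())
--     total = sum(v for _, v in items)
--
--     def first(lo, hi):
--         """Leftmost key in items[lo:hi] with 2*value > total, else None."""
--         if lo >= hi: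
--             return None
--         if hi - lo == 1:
--             k, v = items[lo]
--             return k if 2 * v > total else None
--         mid = (lo + hi) // 2
--         left = first(lo, mid)
--         return left if left is not None else first(mid, hi)
--
--     r = first(0, len(items))
--     return 0 if r is None else r
-- ===== Notes on version B (the rewrite author's own statement) =====
-- stated objective: alternative
-- what changed: Replaces A's lookup-based summing loop and forward early-return scan with a direct sum of the values plus a recursive divide-and-conquer search over the item list for the leftmost key with 2*value > total; Pre_ excludes association lists with duplicate keys, which do not denote a Python dict (the dict collapses duplicates).
import Mathlib
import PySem

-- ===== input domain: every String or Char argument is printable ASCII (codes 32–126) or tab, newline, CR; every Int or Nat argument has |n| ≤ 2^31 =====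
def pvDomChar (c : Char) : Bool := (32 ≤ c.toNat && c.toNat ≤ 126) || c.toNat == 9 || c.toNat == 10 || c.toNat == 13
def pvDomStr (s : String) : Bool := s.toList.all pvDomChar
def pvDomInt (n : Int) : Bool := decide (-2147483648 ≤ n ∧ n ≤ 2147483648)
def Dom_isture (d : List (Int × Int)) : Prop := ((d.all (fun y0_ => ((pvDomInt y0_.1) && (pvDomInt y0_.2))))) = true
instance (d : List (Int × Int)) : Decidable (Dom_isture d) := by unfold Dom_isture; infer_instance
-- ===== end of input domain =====

-- B replaces A's lookup-summing loop and forward early-return scan with a direct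
-- sum of the values plus a divide-and-conquer search for the leftmost qualifying
-- key (objective: alternative).


-- ===== PORT A =====
-- second loop of A: return the first key i with d[i] > num//2, else 0
def istureFind (d : PySem.Dict Int Int) (num : Int) : List (Int × Int) → Int
  | [] => 0
  | kv :: rest =>
      if d.getD kv.1 0 > PySem.Int.floordiv num 2 then kv.1 else istureFind d num rest

def isture (d : List (Int × Int)) : Int :=
  let dd := PySem.Dict.mk d
  let num := d.foldl (fun a kv => a + dd.getD kv.1 0) 0
  istureFind dd num d

-- ===== PORT B =====
-- B's helper first(lo, hi): leftmost key in items[lo:hi] with 2*value > total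
def istureFirst (items : List (Int × Int)) (total : Int) (lo hi : Nat) : Option Int :=
  if _h0 : lo ≥ hi then none
  else if _h1 : hi - lo = 1 then
    match PySem.List.pyGet? items (lo : Int) with
    | some kv => if 2 * kv.2 > total then some kv.1 else none
    | none => none   -- unreachable: lo < hi ≤ len(items)
  else
    let mid := (lo + hi) / 2
    match istureFirst items total lo mid with
    | some k => some k
    | none => istureFirst items total mid hi
termination_by hi - lo
decreasing_by all_goals omega

def isture_alt (d : List (Int × Int)) : Int :=
  let total := (d.map Prod.snd).sum
  match istureFirst d total 0 d.length with
  | some k => k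
  | none => 0

-- ===== PRECONDITION & SPEC =====
-- Pre_ excludes association lists with duplicate keys: they do not denote a Python
-- dict (the dict collapses duplicates), so the first-match reading is accidental.
def Pre_isture (d : List (Int × Int)) : Prop := (d.map Prod.fst).Nodup
instance (d : List (Int × Int)) : Decidable (Pre_isture d) := by unfold Pre_isture; infer_instance

def pvWitness_isture : (List (Int × Int)) := [(1, 3), (2, 1)]

def Spec_isture (d : List (Int × Int)) (out : Int) : Prop := out = isture_alt d
instance (d : List (Int × Int)) (out : Int) : Decidable (Spec_isture d out) := by unfold Spec_isture; infer_instance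

-- ===== CLAIM (what is proved, stated in full; the proofs are below) =====
def Claim_equal_isture : Prop := ∀ (d : List (Int × Int)), Dom_isture d → Pre_isture d → Spec_isture d (isture d)

-- ===== LEMMAS AND PROOFS =====

-- the qualifier test B's search applies to one item
def istureTest (total : Int) (kv : Int × Int) : Option Int :=
  if 2 * kv.2 > total then some kv.1 else none

-- first-match lookup of a key of d returns its value, when keys are unique
lemma isture_lookup (d : List (Int × Int)) (hnd : (d.map Prod.fst).Nodup)
    (kv : Int × Int) (hmem : kv ∈ d) : (PySem.Dict.mk d).getD kv.1 0 = kv.2 :=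
  PySem.Dict.getD_of_mem_items (d := PySem.Dict.mk d) hmem hnd 0

-- A's summing loop equals B's sum of the values
lemma isture_sum (d : List (Int × Int)) (hnd : (d.map Prod.fst).Nodup) :
    d.foldl (fun a kv => a + (PySem.Dict.mk d).getD kv.1 0) 0 = (d.map Prod.snd).sum := by
  have h1 : d.foldl (fun a kv => a + (PySem.Dict.mk d).getD kv.1 0) 0
      = d.foldl (fun a kv => a + kv.2) 0 :=
    PySem.List.foldl_congr_mem d _ _ 0 (fun acc kv hm => by rw [isture_lookup d hnd kv hm])
  rw [h1, ← List.foldl_map, List.sum_eq_foldl]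

-- B's divide-and-conquer search computes the first qualifier of the slice
lemma istureFirst_eq (items : List (Int × Int)) (total : Int) :
    ∀ n lo hi, hi - lo = n → hi ≤ items.length →
    istureFirst items total lo hi
      = ((items.drop lo).take (hi - lo)).findSome? (istureTest total) := by
  intro n
  induction n using Nat.strong_induction_on with
  | _ n ih =>
    intro lo hi hn hlen
    rw [istureFirst]
    by_cases h0 : lo ≥ hi
    · simp [h0, show hi - lo = 0 by omega]
    · simp only [h0, dite_false]
      by_cases h1 : hi - lo = 1
      · have hlo : lo < items.length := by omega
        have : PySem.List.pyGet? items (lo : Int) = some items[lo] := by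
          simp [PySem.List.pyGet?_natCast, List.getElem?_eq_getElem hlo]
        rw [h1]
        have hdrop : (items.drop lo).take 1 = [items[lo]] := by
          rw [List.take_one]
          simp [List.head?_drop, List.getElem?_eq_getElem hlo]
        simp only [dite_true, this, hdrop, List.findSome?]
        unfold istureTest
        split_ifs <;> rfl
      · simp only [h1, dite_false]
        have hmid1 : (lo + hi) / 2 - lo < n := by omega
        have hmid2 : hi - (lo + hi) / 2 < n := by omega
        rw [ih _ hmid1 lo _ rfl (by omega), ih _ hmid2 _ hi rfl hlen]
        have hsplit : (items.drop lo).take (hi - lo)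
            = (items.drop lo).take ((lo + hi) / 2 - lo)
              ++ (items.drop ((lo + hi) / 2)).take (hi - (lo + hi) / 2) := by
          have h2 : hi - lo = ((lo + hi) / 2 - lo) + (hi - (lo + hi) / 2) := by omega
          rw [h2, List.take_add, List.drop_drop,
            Nat.add_sub_cancel' (by omega : lo ≤ (lo + hi) / 2)]
        rw [hsplit, List.findSome?_append]
        cases ((items.drop lo).take ((lo + hi) / 2 - lo)).findSome? (istureTest total) <;> simp

-- A's scan equals the first qualifier of the whole list
lemma istureFind_eq (d : PySem.Dict Int Int) (total : Int)
    (l : List (Int × Int)) (hlk : ∀ kv ∈ l, d.getD kv.1 0 = kv.2) :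
    istureFind d total l
      = (match l.findSome? (istureTest total) with | some k => k | none => 0) := by
  induction l with
  | nil => rfl
  | cons kv rest ih =>
      simp only [istureFind, List.findSome?]
      rw [hlk kv (by simp), PySem.Int.floordiv_eq_ediv_of_pos (by omega : (0:Int) < 2)]
      unfold istureTest
      have hiff : kv.2 > total / 2 ↔ 2 * kv.2 > total := by omega
      split_ifs with hc hq hq
      · rfl
      · exact absurd (hiff.mp hc) hq
      · exact absurd (hiff.mpr hq) hc
      · exact ih (fun x hx => hlk x (by simp [hx]))

-- ===== VERDICT (by name: the statement is the Claim_ definition above) =====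
theorem isture_spec : Claim_equal_isture := by
  intro d _ hpre
  unfold Spec_isture isture isture_alt
  simp only
  rw [isture_sum d hpre,
    istureFind_eq (PySem.Dict.mk d) _ d (fun kv hm => isture_lookup d hpre kv hm),
    istureFirst_eq d _ _ 0 d.length rfl (le_refl _)]
  simp
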